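-- pv_equiv track=rewrite | github.com/carlycarroll25/DSP-439-Exam-4 | script.py | process_sequences
-- ===== SOURCE A (Python) =====
-- def find_kmers(sequence, k):
--     """
--     Extracts all k-mers from the given sequence and maps each k-mer to its possible subsequent k-mers.
--     """
--     kmers = {}
--     for i in range(len(sequence) - k):
--         kmer = sequence[i:i+k]
--         next_kmer = sequence[i+1:i+1+k]
--         if kmer not in kmers:
--             kmers[kmer] = set()
--         kmers[kmer].add(next_kmer)
--     return kmers
--
-- def process_sequences(sequences, k):
--     """
--     Aggregates k-mers and their subsequent k-mers from multiple sequences.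
--     """
--     all_kmers = {}
--     for sequence in sequences:
--         kmers = find_kmers(sequence, k)
--         for kmer, next_kmers in kmers.items():
--             if kmer not in all_kmers:
--                 all_kmers[kmer] = set()
--             all_kmers[kmer].update(next_kmers)
--     return all_kmers
-- ===== SOURCE B (Python) =====
-- def process_sequences(sequences, k):
--     """
--     Aggregates k-mers and their subsequent k-mers from multiple sequences.
--
--     Different decomposition: materialise the flat list of (kmer, next_kmer)
--     pairs across all sequences, extract the distinct source k-mers in first
--     occurrence order, then build each key's successor set by a group-by scan
--     over the pair list -- no dict is mutated while streaming the pairs.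
--     """
--     pairs = [(seq[i:i+k], seq[i+1:i+1+k])
--              for seq in sequences for i in range(len(seq) - k)]
--     keys = []
--     for km, _ in pairs:
--         if km not in keys:
--             keys.append(km)
--     return {km: {nx for km2, nx in pairs if km2 == km} for km in keys}
-- ===== Notes on version B (the rewrite author's own statement) =====
-- stated objective: alternative
-- what changed: B replaces A's streaming dict-of-sets accumulation (per-sequence dict built by find_kmers, then merged entry by entry into a global dict) with a staged group-by: it first materialises the flat list of (kmer, next_kmer) pairs over all sequences, then extracts the distinct source k-mers in first-occurrence order, and finally builds each key's successor set by a separate scan over the pair list, so no dict is mutated while the pairs are produced.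
import Mathlib
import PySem

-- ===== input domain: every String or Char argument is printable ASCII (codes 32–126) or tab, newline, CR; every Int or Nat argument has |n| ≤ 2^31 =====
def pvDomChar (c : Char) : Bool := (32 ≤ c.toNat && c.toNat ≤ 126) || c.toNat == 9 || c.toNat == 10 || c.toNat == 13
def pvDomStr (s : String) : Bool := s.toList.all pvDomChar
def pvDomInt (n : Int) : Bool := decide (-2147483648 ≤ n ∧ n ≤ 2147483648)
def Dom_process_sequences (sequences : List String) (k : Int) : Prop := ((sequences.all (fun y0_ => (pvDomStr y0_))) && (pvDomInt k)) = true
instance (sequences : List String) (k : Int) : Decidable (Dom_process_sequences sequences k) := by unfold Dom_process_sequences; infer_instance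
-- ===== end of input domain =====

-- B replaces A's streaming dict-of-sets accumulation (per-sequence dict, then merge)
-- with a staged group-by: flat pair list, distinct keys, then one scan per key (alternative).

-- ===== PORT A =====
def find_kmers (sequence : String) (k : Int) : PySem.Dict String (PySem.Set String) :=
  (PySem.List.pyRange 0 (PySem.Str.len sequence - k) 1).foldl
    (fun kmers i =>
      let kmer := PySem.Str.slice sequence (some i) (some (i + k))
      let next_kmer := PySem.Str.slice sequence (some (i + 1)) (some (i + 1 + k))
      let kmers' := if kmers.contains kmer then kmers else kmers.insert kmer PySem.Set.empty
      kmers'.modify kmer PySem.Set.empty (fun s => PySem.Set.add s next_kmer))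
    PySem.Dict.empty

def process_sequences (sequences : List String) (k : Int) : List (String × List String) :=
  (sequences.foldl
    (fun all_kmers sequence =>
      (find_kmers sequence k).items.foldl
        (fun all p =>
          let all' := if all.contains p.1 then all else all.insert p.1 PySem.Set.empty
          all'.modify p.1 PySem.Set.empty (fun s => PySem.Set.update s p.2))
        all_kmers)
    PySem.Dict.empty).items

-- ===== PORT B =====
-- Source B's pair comprehension, per sequence
def pvPairs (s : String) (k : Int) : List (String × String) :=
  (PySem.List.pyRange 0 (PySem.Str.len s - k) 1).map
    (fun i => (PySem.Str.slice s (some i) (some (i + k)),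
               PySem.Str.slice s (some (i + 1)) (some (i + 1 + k))))

def process_sequences_alt (sequences : List String) (k : Int) : List (String × List String) :=
  let pairs := sequences.foldl (fun acc s => acc ++ pvPairs s k) []
  let keys := pairs.foldl
    (fun ks p => if ks.contains p.1 then ks else ks ++ [p.1]) ([] : List String)
  keys.map (fun km =>
    (km, PySem.Set.ofList ((pairs.filter (fun p => p.1 == km)).map Prod.snd)))

-- ===== PRECONDITION & SPEC =====
def Spec_process_sequences (sequences : List String) (k : Int) (out : List (String × List String)) : Prop := out = process_sequences_alt sequences k
instance (sequences : List String) (k : Int) (out : List (String × List String)) : Decidable (Spec_process_sequences sequences k out) := by unfold Spec_process_sequences; infer_instance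

-- ===== CLAIM (what is proved, stated in full; the proofs are below) =====
def Claim_equal_process_sequences : Prop := ∀ (sequences : List String) (k : Int), Dom_process_sequences sequences k → Spec_process_sequences sequences k (process_sequences sequences k)

-- ===== LEMMAS AND PROOFS =====

-- proof-only abbreviations for the two dict steps both of A's loops perform
def pvStep (d : PySem.Dict String (PySem.Set String)) (km nx : String) : PySem.Dict String (PySem.Set String) :=
  d.modify km PySem.Set.empty (fun s => PySem.Set.add s nx)

def pvUpd (d : PySem.Dict String (PySem.Set String)) (km : String) (S : List String) : PySem.Dict String (PySem.Set String) :=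
  d.modify km PySem.Set.empty (fun s => PySem.Set.update s S)

-- Python's "if k not in d: d[k] = v" followed by a modify at k is just the modify
theorem pv_setdefault_modify {κ ν : Type} [BEq κ] [LawfulBEq κ]
    (d : PySem.Dict κ ν) (k : κ) (v : ν) (f : ν → ν) :
    ((if d.contains k then d else d.insert k v).modify k v f) = d.modify k v f := by
  by_cases h : d.contains k = true
  · simp [h]
  · have h' : d.contains k = false := by simpa using h
    rw [if_neg (by simp [h'])]
    simp only [PySem.Dict.modify, PySem.Dict.getD_insert_self,
      PySem.Dict.getD_of_not_contains _ _ h', PySem.Dict.insert_insert_self]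

-- A's two loop bodies rewritten through pvStep / pvUpd
theorem pv_astep_eq (s : String) (k : Int) :
    (fun (kmers : PySem.Dict String (PySem.Set String)) (i : Int) =>
      let kmer := PySem.Str.slice s (some i) (some (i + k))
      let next_kmer := PySem.Str.slice s (some (i + 1)) (some (i + 1 + k))
      let kmers' := if kmers.contains kmer then kmers else kmers.insert kmer PySem.Set.empty
      kmers'.modify kmer PySem.Set.empty (fun t => PySem.Set.add t next_kmer))
    = fun kmers i => pvStep kmers (PySem.Str.slice s (some i) (some (i + k)))
        (PySem.Str.slice s (some (i + 1)) (some (i + 1 + k))) := by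
  funext kmers i
  show (if kmers.contains (PySem.Str.slice s (some i) (some (i + k))) then kmers
      else kmers.insert (PySem.Str.slice s (some i) (some (i + k))) PySem.Set.empty).modify
      (PySem.Str.slice s (some i) (some (i + k))) PySem.Set.empty
      (fun t => PySem.Set.add t (PySem.Str.slice s (some (i + 1)) (some (i + 1 + k)))) = _
  rw [pv_setdefault_modify]
  rfl

theorem pv_mstep_eq :
    (fun (all : PySem.Dict String (PySem.Set String)) (p : String × List String) =>
      let all' := if all.contains p.1 then all else all.insert p.1 PySem.Set.empty
      all'.modify p.1 PySem.Set.empty (fun t => PySem.Set.update t p.2))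
    = fun all p => pvUpd all p.1 p.2 := by
  funext all p
  show (if all.contains p.1 then all else all.insert p.1 PySem.Set.empty).modify p.1
      PySem.Set.empty (fun t => PySem.Set.update t p.2) = _
  rw [pv_setdefault_modify]
  rfl

-- updating with (t.add x) is updating with t, then one add
theorem pv_update_add (s t : PySem.Set String) (x : String) :
    PySem.Set.update s (PySem.Set.add t x) = PySem.Set.add (PySem.Set.update s t) x := by
  by_cases h : x ∈ t
  · rw [PySem.Set.add_of_mem h,
        PySem.Set.add_of_mem ((PySem.Set.mem_update s t x).mpr (Or.inr h))]
  · rw [PySem.Set.add_of_not_mem h]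
    show List.foldl PySem.Set.add s (t ++ [x]) = _
    rw [List.foldl_append]
    rfl

-- updating with an already deduplicated list updates with the raw list
theorem pv_update_update (l : List String) :
    ∀ (s t : PySem.Set String),
    PySem.Set.update s (PySem.Set.update t l) = PySem.Set.update (PySem.Set.update s t) l := by
  induction l with
  | nil => intro s t; rfl
  | cons x l ih =>
    intro s t
    show PySem.Set.update s (PySem.Set.update (PySem.Set.add t x) l)
        = PySem.Set.update (PySem.Set.update s t) (x :: l)
    rw [ih s (PySem.Set.add t x), pv_update_add]
    rfl

theorem pv_update_ofList (s : PySem.Set String) (l : List String) :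
    PySem.Set.update s (PySem.Set.ofList l) = PySem.Set.update s l := by
  have h : PySem.Set.ofList l = PySem.Set.update ([] : PySem.Set String) l :=
    PySem.Set.ofList_eq_foldl l
  rw [h, pv_update_update l s []]
  rfl

theorem pv_ofList_append (l1 l2 : List String) :
    PySem.Set.ofList (l1 ++ l2) = PySem.Set.update (PySem.Set.ofList l1) l2 := by
  rw [PySem.Set.ofList_eq_foldl, PySem.Set.ofList_eq_foldl, List.foldl_append]
  rfl

-- filtering a Nodup list for one element
theorem pv_filter_nodup (l : List String) (km : String) (h : l.Nodup) :
    l.filter (fun x => x == km) = if km ∈ l then [km] else [] := by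
  rw [List.filter_beq]
  by_cases hm : km ∈ l
  · have h1 : List.count km l = 1 :=
      Nat.le_antisymm (List.nodup_iff_count_le_one.mp h km) (List.count_pos_iff.mpr hm)
    rw [if_pos hm, h1]
    rfl
  · rw [if_neg hm, List.count_eq_zero_of_not_mem hm]
    rfl

-- keys / getD of a pvStep fold
theorem pv_stepKeys (P : List (String × String)) (d : PySem.Dict String (PySem.Set String)) :
    (P.foldl (fun d p => pvStep d p.1 p.2) d).keys
      = PySem.Set.update d.keys (P.map Prod.fst) :=
  PySem.Dict.keys_foldl_modify_key P Prod.fst PySem.Set.empty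
    (fun _ p => fun s => PySem.Set.add s p.2) d

theorem pv_stepGetD (P : List (String × String)) :
    ∀ (d : PySem.Dict String (PySem.Set String)) (km : String),
    (P.foldl (fun d p => pvStep d p.1 p.2) d).getD km PySem.Set.empty
      = PySem.Set.update (d.getD km PySem.Set.empty)
          ((P.filter (fun p => p.1 == km)).map Prod.snd) := by
  induction P with
  | nil => intro d km; rfl
  | cons p P ih =>
    intro d km
    simp only [List.foldl_cons]
    rw [ih (pvStep d p.1 p.2) km]
    by_cases h : p.1 = km
    · subst h
      have hg : (pvStep d p.1 p.2).getD p.1 PySem.Set.empty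
          = PySem.Set.add (d.getD p.1 PySem.Set.empty) p.2 := by
        rw [pvStep, PySem.Dict.getD_modify]; simp
      rw [hg]
      simp only [List.filter_cons, beq_self_eq_true, if_pos trivial, List.map_cons]
      rfl
    · have hg : (pvStep d p.1 p.2).getD km PySem.Set.empty = d.getD km PySem.Set.empty := by
        rw [pvStep, PySem.Dict.getD_modify, if_neg (fun he => h he.symm)]
      rw [hg]
      have hf : (p.1 == km) = false := beq_eq_false_iff_ne.mpr h
      simp [hf]

-- keys / getD of a pvUpd fold (A's merge loop)
theorem pv_updKeys (its : List (String × List String)) (d : PySem.Dict String (PySem.Set String)) :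
    (its.foldl (fun d p => pvUpd d p.1 p.2) d).keys
      = PySem.Set.update d.keys (its.map Prod.fst) :=
  PySem.Dict.keys_foldl_modify_key its Prod.fst PySem.Set.empty
    (fun _ p => fun s => PySem.Set.update s p.2) d

theorem pv_updGetD (its : List (String × List String)) :
    ∀ (d : PySem.Dict String (PySem.Set String)) (km : String),
    (its.foldl (fun d p => pvUpd d p.1 p.2) d).getD km PySem.Set.empty
      = ((its.filter (fun p => p.1 == km)).map Prod.snd).foldl
          (fun s S => PySem.Set.update s S) (d.getD km PySem.Set.empty) := by
  induction its with
  | nil => intro d km; rfl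
  | cons p its ih =>
    intro d km
    simp only [List.foldl_cons]
    rw [ih (pvUpd d p.1 p.2) km]
    by_cases h : p.1 = km
    · subst h
      have hg : (pvUpd d p.1 p.2).getD p.1 PySem.Set.empty
          = PySem.Set.update (d.getD p.1 PySem.Set.empty) p.2 := by
        rw [pvUpd, PySem.Dict.getD_modify]; simp
      rw [hg]
      simp only [List.filter_cons, beq_self_eq_true, if_pos trivial, List.map_cons,
        List.foldl_cons]
    · have hg : (pvUpd d p.1 p.2).getD km PySem.Set.empty = d.getD km PySem.Set.empty := by
        rw [pvUpd, PySem.Dict.getD_modify, if_neg (fun he => h he.symm)]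
      rw [hg]
      have hf : (p.1 == km) = false := beq_eq_false_iff_ne.mpr h
      simp [hf]

-- find_kmers as a pvStep fold over the sequence's pair list
theorem pv_find_kmers_eq (s : String) (k : Int) :
    find_kmers s k
      = (pvPairs s k).foldl (fun d p => pvStep d p.1 p.2) PySem.Dict.empty := by
  rw [find_kmers, pv_astep_eq, pvPairs, List.foldl_map]

-- items of find_kmers: the group-by model of its own pair list
theorem pv_find_kmers_items (s : String) (k : Int) :
    (find_kmers s k).items
      = (PySem.Set.ofList ((pvPairs s k).map Prod.fst)).map
          (fun km => (km, PySem.Set.ofList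
            (((pvPairs s k).filter (fun p => p.1 == km)).map Prod.snd))) := by
  rw [pv_find_kmers_eq]
  have hk : ((pvPairs s k).foldl (fun d p => pvStep d p.1 p.2) PySem.Dict.empty).keys
      = PySem.Set.ofList ((pvPairs s k).map Prod.fst) := by
    rw [pv_stepKeys]
    rw [PySem.Set.ofList_eq_foldl]
    rfl
  have hnd : ((pvPairs s k).foldl (fun d p => pvStep d p.1 p.2) PySem.Dict.empty).keys.Nodup := by
    rw [hk]; exact PySem.Set.nodup_ofList _
  rw [PySem.Dict.items_eq_map_keys _ hnd PySem.Set.empty, hk]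
  apply List.map_congr_left
  intro km _
  rw [pv_stepGetD]
  rw [PySem.Set.ofList_eq_foldl]
  rfl

-- the per-key value function of a pair list
def pvVal (P : List (String × String)) (km : String) : PySem.Set String :=
  PySem.Set.ofList ((P.filter (fun p => p.1 == km)).map Prod.snd)

-- merging one sequence's find_kmers table into a dict that models pair list P
-- yields the model of P ++ pvPairs s k
theorem pv_merge_one (s : String) (k : Int) (P : List (String × String))
    (d : PySem.Dict String (PySem.Set String))
    (hk : d.keys = PySem.Set.ofList (P.map Prod.fst))
    (hg : ∀ km, d.getD km PySem.Set.empty = pvVal P km) :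
    ((find_kmers s k).items.foldl (fun d p => pvUpd d p.1 p.2) d).keys
        = PySem.Set.ofList ((P ++ pvPairs s k).map Prod.fst) ∧
    ∀ km, ((find_kmers s k).items.foldl (fun d p => pvUpd d p.1 p.2) d).getD km PySem.Set.empty
        = pvVal (P ++ pvPairs s k) km := by
  have hfst : (find_kmers s k).items.map Prod.fst
      = PySem.Set.ofList ((pvPairs s k).map Prod.fst) := by
    rw [pv_find_kmers_items, List.map_map]
    exact List.map_id _
  constructor
  · rw [pv_updKeys, hk, hfst, pv_update_ofList, ← pv_ofList_append, ← List.map_append]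
  · intro km
    rw [pv_updGetD, hg km]
    have hfil : (find_kmers s k).items.filter (fun p => p.1 == km)
        = ((PySem.Set.ofList ((pvPairs s k).map Prod.fst)).filter (fun x => x == km)).map
            (fun km' => (km', PySem.Set.ofList
              (((pvPairs s k).filter (fun p => p.1 == km')).map Prod.snd))) := by
      rw [pv_find_kmers_items, List.filter_map]
      rfl
    rw [hfil, pv_filter_nodup _ km (PySem.Set.nodup_ofList _)]
    by_cases hm : km ∈ PySem.Set.ofList ((pvPairs s k).map Prod.fst)
    · rw [if_pos hm]
      show PySem.Set.update (pvVal P km)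
          (PySem.Set.ofList (((pvPairs s k).filter (fun p => p.1 == km)).map Prod.snd))
        = pvVal (P ++ pvPairs s k) km
      rw [pv_update_ofList, pvVal, pvVal, List.filter_append, List.map_append,
          pv_ofList_append]
    · rw [if_neg hm]
      have hmem : km ∉ (pvPairs s k).map Prod.fst := fun h =>
        hm ((PySem.Set.mem_ofList _ km).mpr h)
      have hfil2 : (pvPairs s k).filter (fun p => p.1 == km) = [] := by
        rw [List.filter_eq_nil_iff]
        intro p hp hb
        exact hmem ((eq_of_beq hb) ▸ List.mem_map_of_mem (f := Prod.fst) hp)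
      rw [pvVal, pvVal, List.filter_append, hfil2, List.append_nil]
      rfl

-- MAIN: A's outer fold models the concatenated pair list
theorem pv_main (k : Int) (ss : List String) :
    ∀ (P : List (String × String)) (d : PySem.Dict String (PySem.Set String)),
    d.keys = PySem.Set.ofList (P.map Prod.fst) →
    (∀ km, d.getD km PySem.Set.empty = pvVal P km) →
    (ss.foldl (fun all s => (find_kmers s k).items.foldl (fun all p => pvUpd all p.1 p.2) all) d).keys
        = PySem.Set.ofList ((P ++ ss.flatMap (fun s => pvPairs s k)).map Prod.fst) ∧
    ∀ km, (ss.foldl (fun all s => (find_kmers s k).items.foldl (fun all p => pvUpd all p.1 p.2) all) d).getD km PySem.Set.empty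
        = pvVal (P ++ ss.flatMap (fun s => pvPairs s k)) km := by
  induction ss with
  | nil =>
    intro P d hk hg
    simpa using ⟨hk, hg⟩
  | cons s ss ih =>
    intro P d hk hg
    obtain ⟨hk1, hg1⟩ := pv_merge_one s k P d hk hg
    have := ih (P ++ pvPairs s k)
      ((find_kmers s k).items.foldl (fun all p => pvUpd all p.1 p.2) d) hk1 hg1
    simpa [List.append_assoc] using this

-- B's key loop is Set.ofList of the firsts
theorem pv_keysB (pairs : List (String × String)) :
    pairs.foldl (fun ks p => if ks.contains p.1 then ks else ks ++ [p.1]) ([] : List String)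
      = PySem.Set.ofList (pairs.map Prod.fst) := by
  have h : (fun (ks : List String) (p : String × String) =>
      if ks.contains p.1 then ks else ks ++ [p.1])
      = fun ks p => PySem.Set.add ks p.1 := rfl
  rw [h, PySem.Set.ofList_eq_foldl, ← List.foldl_map]

-- ===== VERDICT (by name: the statement is the Claim_ definition above) =====
theorem process_sequences_spec : Claim_equal_process_sequences := by
  intro sequences k _
  show process_sequences sequences k = process_sequences_alt sequences k
  rw [process_sequences, pv_mstep_eq]
  have h0k : (PySem.Dict.empty : PySem.Dict String (PySem.Set String)).keys
      = PySem.Set.ofList (([] : List (String × String)).map Prod.fst) := rfl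
  have h0g : ∀ km, (PySem.Dict.empty : PySem.Dict String (PySem.Set String)).getD km PySem.Set.empty
      = pvVal [] km := fun km => rfl
  obtain ⟨hk, hg⟩ := pv_main k sequences [] PySem.Dict.empty h0k h0g
  simp only [List.nil_append] at hk hg
  have hnd : (sequences.foldl (fun all s =>
      (find_kmers s k).items.foldl (fun all p => pvUpd all p.1 p.2) all) PySem.Dict.empty).keys.Nodup := by
    rw [hk]; exact PySem.Set.nodup_ofList _
  rw [PySem.Dict.items_eq_map_keys _ hnd PySem.Set.empty, hk]
  rw [show process_sequences_alt sequences k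
      = ((sequences.foldl (fun acc s => acc ++ pvPairs s k) []).foldl
          (fun ks p => if ks.contains p.1 then ks else ks ++ [p.1]) ([] : List String)).map
          (fun km => (km, PySem.Set.ofList
            (((sequences.foldl (fun acc s => acc ++ pvPairs s k) []).filter
              (fun p => p.1 == km)).map Prod.snd))) from rfl]
  rw [PySem.List.foldl_append_eq_flatMap (fun s => pvPairs s k) sequences [], List.nil_append,
      pv_keysB]
  apply List.map_congr_left
  intro km _
  rw [hg km]
  rfl
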